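-- pv_equiv track=rewrite | github.com/mwootten/seizure-forecasting | src/features/read_eeg.py | select_segments
-- ===== SOURCE A (Python) =====
-- SECONDS_PER_SEGMENT = 5
--
-- def overlaps(s1, s2):
--     """
--     Determines whether segments specified by their endpoints overlap.
--     """
--     (i1, f1) = s1
--     (i2, f2) = s2
--     return ((i1 < f2) and (i2 < f1)) or ((i2 < f1) and (i1 < f2))
--
-- def any_overlap(t_i, t_f, segments):
--     """
--     Extends `overlaps` to check against an artitrary number of segments at once
--     """
--     return any(overlaps((t_i, t_f), seg) for seg in segments)
--
-- def select_segments(num_segments, seizure_times):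
--     """
--     Selects segments that meet the criteria for inclusion in the model:
--     * They don't overlap with a seizure (we care about preictal activity only)
--     * It is possible to determine the duration until the next seizure. That
--       means that the segment must be discarded if it is after the last seizure
--       in any given file, because no one knows whether the next seizure was
--       15 minutes or 3 hours after the end.
--
--      Also, split up the recording based on which seizures it precedes. This is
--      to make sure that within each stretch of segments, segments which are
--      consecutive in the array are consecutive in real life. This would prevent,
--      for example, a snippet one second before a seizure from appearing next to
--      the postictal segment 35 minutes before the next seizure. While this does
--      not matter if the model inputs are single segments, this would screw up
--      convolutional or other sequential models.
--
--     Outputs: an array of pairs of the following two variables, one for each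
--     seizure in the given file:
--
--     * `indices`: the indices of the segments in the original file
--     * `Y`: the time until the next seizure for each segment; corresponds to
--       positions in the `indices` array
--
--     """
--     num_seizures = len(seizure_times)
--     indices = [[] for _ in range(num_seizures)]
--     Y = [[] for _ in range(num_seizures)]
--     for segment_num in range(num_segments):
--         t_i = SECONDS_PER_SEGMENT * (segment_num + 0)
--         t_f = SECONDS_PER_SEGMENT * (segment_num + 1)
--         overlaps_seizure = any_overlap(t_i, t_f, seizure_times)
--         time_before_each_seizure = [
--             # the time from the end of the segment to the seizure start
--             (st_i - t_f, seizure_index)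
--             # for all of the seizures
--             for (seizure_index, (st_i, st_f)) in enumerate(seizure_times)
--             # if the segment ends before the seizure begins
--             if t_f <= st_i
--         ]
--         # If no segments meet the requirements, then just add None
--         # otherwise,
--         (time_before_last_seizure, last_seizure_index) = \
--             min(time_before_each_seizure, default=(None, None))
--         if (not overlaps_seizure) and time_before_last_seizure is not None:
--             indices[last_seizure_index].append(segment_num)
--             Y[last_seizure_index].append(time_before_last_seizure)
--     return list(zip(indices, Y))
-- ===== SOURCE B (Python) =====
-- SECONDS_PER_SEGMENT = 5
--
-- def select_segments(num_segments, seizure_times):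
--     n = len(seizure_times)
--     # seizures sorted by (start, original index); each entry keeps its end for the sweep
--     order = sorted(((s, j, f) for (j, (s, f)) in enumerate(seizure_times)),
--                    key=lambda t: (t[0], t[1]))
--     indices = [[] for _ in range(n)]
--     Y = [[] for _ in range(n)]
--     p = 0          # first seizure in `order` whose start is >= current segment end
--     max_end = None # latest seizure end among seizures already passed by the pointer
--     for seg in range(num_segments):
--         t_i = SECONDS_PER_SEGMENT * seg
--         t_f = t_i + SECONDS_PER_SEGMENT
--         while p < n and order[p][0] < t_f:
--             e = order[p][2]
--             if max_end is None or e > max_end: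
--                 max_end = e
--             p += 1
--         if p < n and (max_end is None or max_end <= t_i):
--             (s, j, _) = order[p]
--             indices[j].append(seg)
--             Y[j].append(s - t_f)
--     return list(zip(indices, Y))
-- ===== Notes on version B (the rewrite author's own statement) =====
-- stated objective: faster
-- what changed: Instead of scanning all seizures once for the overlap test and once more for the min-search at every segment, B sorts the seizures by (start, index) once and sweeps a two-pointer over the segments, maintaining the running maximum seizure end among passed seizures for the overlap test and reading the next seizure directly at the pointer.
import Mathlib
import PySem

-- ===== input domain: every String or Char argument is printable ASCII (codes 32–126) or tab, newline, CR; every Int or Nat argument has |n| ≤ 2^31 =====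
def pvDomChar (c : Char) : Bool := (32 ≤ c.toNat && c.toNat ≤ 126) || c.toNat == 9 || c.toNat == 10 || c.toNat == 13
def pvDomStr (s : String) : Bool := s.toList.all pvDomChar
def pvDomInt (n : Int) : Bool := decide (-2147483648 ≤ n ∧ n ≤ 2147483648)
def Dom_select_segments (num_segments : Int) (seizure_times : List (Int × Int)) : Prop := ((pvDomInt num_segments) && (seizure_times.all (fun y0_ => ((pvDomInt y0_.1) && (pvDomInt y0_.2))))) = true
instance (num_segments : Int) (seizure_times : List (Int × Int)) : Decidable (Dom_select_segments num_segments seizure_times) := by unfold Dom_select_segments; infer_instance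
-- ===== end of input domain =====

-- B replaces A's per-segment scan over all seizures by one sort of the seizures and a
-- two-pointer sweep (running max of passed seizure ends for the overlap test); same output.

def SECONDS_PER_SEGMENT : Int := 5

-- `indices[j].append(v)` on a list of lists
def pyAppendAt (xs : List (List Int)) (j : Int) (v : Int) : List (List Int) :=
  match xs with
  | [] => []
  | h :: t => if j = 0 then (h ++ [v]) :: t else h :: pyAppendAt t (j - 1) v

-- ===== PORT A =====
def overlapsA (s1 s2 : Int × Int) : Bool :=
  ((s1.1 < s2.2) && (s2.1 < s1.2)) || ((s2.1 < s1.2) && (s1.1 < s2.2))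

def any_overlapA (t_i t_f : Int) (segments : List (Int × Int)) : Bool :=
  segments.any (fun seg => overlapsA (t_i, t_f) seg)

-- the body of A's `for segment_num in range(num_segments)` loop
def stepA (seizure_times : List (Int × Int))
    (acc : List (List Int) × List (List Int)) (segment_num : Int) :
    List (List Int) × List (List Int) :=
  let t_i := SECONDS_PER_SEGMENT * (segment_num + 0)
  let t_f := SECONDS_PER_SEGMENT * (segment_num + 1)
  let overlaps_seizure := any_overlapA t_i t_f seizure_times
  let time_before_each_seizure :=
    ((PySem.List.enumerate seizure_times 0).filter
        (fun q => decide (t_f ≤ q.2.1))).map (fun q => (q.2.1 - t_f, q.1))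
  match PySem.List.min2? time_before_each_seizure (fun q => q.1) (fun q => q.2) with
  | some (time_before_last_seizure, last_seizure_index) =>
    if !overlaps_seizure then
      (pyAppendAt acc.1 last_seizure_index segment_num,
       pyAppendAt acc.2 last_seizure_index time_before_last_seizure)
    else acc
  | none => acc

def select_segments (num_segments : Int) (seizure_times : List (Int × Int)) :
    List (List Int × List Int) :=
  let num_seizures := seizure_times.length
  let st := (PySem.List.pyRange 0 num_segments 1).foldl (stepA seizure_times)
    (List.replicate num_seizures [], List.replicate num_seizures [])
  st.1.zip st.2

-- ===== PORT B =====
-- the `while p < n and order[p][0] < t_f` pointer advance, with the running max of ends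
def advanceB (order : List (Int × Int × Int)) (t_f : Int) (p : Nat) (max_end : Option Int) :
    Nat × Option Int :=
  if h : p < order.length then
    if (order[p]).1 < t_f then
      let e := (order[p]).2.2
      advanceB order t_f (p + 1)
        (match max_end with
         | none => some e
         | some m => if e > m then some e else some m)
    else (p, max_end)
  else (p, max_end)
termination_by order.length - p

-- the body of B's `for seg in range(num_segments)` loop
def stepB (order : List (Int × Int × Int))
    (acc : Nat × Option Int × List (List Int) × List (List Int)) (seg : Int) :
    Nat × Option Int × List (List Int) × List (List Int) :=
  let t_i := SECONDS_PER_SEGMENT * seg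
  let t_f := t_i + SECONDS_PER_SEGMENT
  let pm := advanceB order t_f acc.1 acc.2.1
  if hp : pm.1 < order.length then
    if (match pm.2 with | none => true | some m => decide (m ≤ t_i)) then
      let trip := order[pm.1]
      (pm.1, pm.2, pyAppendAt acc.2.2.1 trip.2.1 seg,
       pyAppendAt acc.2.2.2 trip.2.1 (trip.1 - t_f))
    else (pm.1, pm.2, acc.2.2.1, acc.2.2.2)
  else (pm.1, pm.2, acc.2.2.1, acc.2.2.2)

def select_segments_alt (num_segments : Int) (seizure_times : List (Int × Int)) :
    List (List Int × List Int) :=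
  let n := seizure_times.length
  let order := PySem.List.sorted2
      ((PySem.List.enumerate seizure_times 0).map (fun q => (q.2.1, q.1, q.2.2)))
      (fun t => t.1) (fun t => t.2.1)
  let st := (PySem.List.pyRange 0 num_segments 1).foldl (stepB order)
    (0, none, List.replicate n [], List.replicate n [])
  st.2.2.1.zip st.2.2.2

-- ===== PRECONDITION & SPEC =====
def Spec_select_segments (num_segments : Int) (seizure_times : List (Int × Int)) (out : List (List Int × List Int)) : Prop := out = select_segments_alt num_segments seizure_times
instance (num_segments : Int) (seizure_times : List (Int × Int)) (out : List (List Int × List Int)) : Decidable (Spec_select_segments num_segments seizure_times out) := by unfold Spec_select_segments; infer_instance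

-- ===== CLAIM (what is proved, stated in full; the proofs are below) =====
def Claim_equal_select_segments : Prop := ∀ (num_segments : Int) (seizure_times : List (Int × Int)), Dom_select_segments num_segments seizure_times → Spec_select_segments num_segments seizure_times (select_segments num_segments seizure_times)

-- ===== LEMMAS AND PROOFS =====

-- the (s, j, f) triples in original order, and B's sorted list
def triplesOf (T : List (Int × Int)) : List (Int × Int × Int) :=
  (PySem.List.enumerate T 0).map (fun q => (q.2.1, q.1, q.2.2))

def bOrderOf (T : List (Int × Int)) : List (Int × Int × Int) :=
  PySem.List.sorted2 (triplesOf T) (fun t => t.1) (fun t => t.2.1)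

-- the lexicographic "strictly before" test sorted2 / min2? use on tuple keys
def lexBefore (a b : Int × Int × Int) : Bool :=
  decide (a.1 < b.1) || (!decide (b.1 < a.1) && decide (a.2.1 < b.2.1))

theorem bOrderOf_def (T : List (Int × Int)) :
    bOrderOf T = (triplesOf T).foldl (fun acc x => PySem.List.insertBy lexBefore x acc) [] := rfl

theorem insertBy_pairwise {α : Type} (bf : α → α → Bool)
    (hasym : ∀ a b, bf a b = true → bf b a = false)
    (htr : ∀ a b c, bf a b = true → bf c b = false → bf c a = false)
    (x : α) (l : List α) (hl : l.Pairwise (fun a b => bf b a = false)) :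
    (PySem.List.insertBy bf x l).Pairwise (fun a b => bf b a = false) := by
  induction l with
  | nil => simp [PySem.List.insertBy]
  | cons y ys ih =>
    rw [List.pairwise_cons] at hl
    obtain ⟨hy, hys⟩ := hl
    by_cases hxy : bf x y = true
    · simp only [PySem.List.insertBy, hxy, if_true]
      refine List.Pairwise.cons ?_ (List.Pairwise.cons hy hys)
      intro z hz
      rcases List.mem_cons.1 hz with rfl | hz
      · exact hasym _ _ hxy
      · exact htr x y z hxy (hy z hz)
    · have hxy' : bf x y = false := by simpa using hxy
      have : PySem.List.insertBy bf x (y :: ys) = y :: PySem.List.insertBy bf x ys := by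
        simp [PySem.List.insertBy, hxy']
      rw [this]
      refine List.Pairwise.cons ?_ (ih hys)
      intro z hz
      rcases (PySem.List.mem_insertBy bf x z ys).1 hz with rfl | hz
      · exact hxy'
      · exact hy z hz

theorem foldl_insertBy_pairwise {α : Type} (bf : α → α → Bool)
    (hasym : ∀ a b, bf a b = true → bf b a = false)
    (htr : ∀ a b c, bf a b = true → bf c b = false → bf c a = false)
    (xs : List α) : ∀ (l : List α), l.Pairwise (fun a b => bf b a = false) →
    (xs.foldl (fun acc x => PySem.List.insertBy bf x acc) l).Pairwise
      (fun a b => bf b a = false) := by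
  induction xs with
  | nil => intro l hl; simpa using hl
  | cons x xs ih =>
    intro l hl
    exact ih _ (insertBy_pairwise bf hasym htr x l hl)

theorem lexBefore_asym : ∀ a b, lexBefore a b = true → lexBefore b a = false := by
  intro a b; simp only [lexBefore]; intro h; revert h
  by_cases h1 : a.1 < b.1 <;> by_cases h2 : b.1 < a.1 <;>
    by_cases h3 : a.2.1 < b.2.1 <;> by_cases h4 : b.2.1 < a.2.1 <;>
    simp [h1, h2, h3, h4] <;> omega

theorem lexBefore_tr : ∀ a b c, lexBefore a b = true → lexBefore c b = false → lexBefore c a = false := by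
  intro a b c
  simp only [lexBefore, Bool.or_eq_true, Bool.and_eq_true, Bool.not_eq_true',
    decide_eq_true_iff, decide_eq_false_iff_not, Bool.or_eq_false_iff, Bool.and_eq_false_iff,
    Bool.not_eq_false']
  omega

theorem bOrderOf_pairwise (T : List (Int × Int)) :
    (bOrderOf T).Pairwise (fun a b => lexBefore b a = false) := by
  rw [bOrderOf_def]
  exact foldl_insertBy_pairwise lexBefore lexBefore_asym lexBefore_tr _ [] (by simp)

theorem bOrderOf_perm (T : List (Int × Int)) : (bOrderOf T).Perm (triplesOf T) :=
  PySem.List.sorted2_perm _ _ _ _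

theorem bOrderOf_nodup_j (T : List (Int × Int)) :
    ((bOrderOf T).map (fun x => x.2.1)).Nodup := by
  have h1 : ((triplesOf T).map (fun x => x.2.1)).Nodup := by
    unfold triplesOf
    rw [List.map_map]
    have : ((PySem.List.enumerate T 0).map
        ((fun x : Int × Int × Int => x.2.1) ∘ (fun q : Int × (Int × Int) => (q.2.1, q.1, q.2.2))))
        = (PySem.List.enumerate T 0).map (fun q => q.1) := by
      simp [Function.comp]
    rw [this]
    have hpw := PySem.List.pairwise_lt_enumerate (xs := T) (s := 0)
    exact (List.pairwise_map).2 (hpw.imp (fun h => ne_of_lt h))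
  exact ((bOrderOf_perm T).map (fun x => x.2.1)).nodup_iff.2 h1

-- B's sorted list is strictly lexicographically increasing (all indices are distinct)
theorem bOrderOf_pairwise_lt (T : List (Int × Int)) :
    (bOrderOf T).Pairwise
      (fun a b => a.1 < b.1 ∨ (a.1 = b.1 ∧ a.2.1 < b.2.1)) := by
  have h1 := bOrderOf_pairwise T
  have h2 : (bOrderOf T).Pairwise (fun a b => a.2.1 ≠ b.2.1) :=
    List.pairwise_map.1 (bOrderOf_nodup_j T)
  refine (h1.and h2).imp ?_
  intro a b ⟨hle, hne⟩
  simp only [lexBefore, Bool.or_eq_false_iff, Bool.and_eq_false_iff,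
    decide_eq_false_iff_not, Bool.not_eq_false', decide_eq_true_iff] at hle
  omega

theorem bOrderOf_pairwise_le (T : List (Int × Int)) :
    (bOrderOf T).Pairwise (fun a b => a.1 ≤ b.1) :=
  (bOrderOf_pairwise_lt T).imp (by intro a b h; omega)

theorem max?_concat (l : List Int) (e : Int) :
    ((l ++ [e]).max?) = some (l.max?.elim e (fun m => max m e)) := by
  cases hm : l.max? with
  | none =>
    rw [List.max?_eq_none_iff.1 hm]
    simp
  | some m =>
    obtain ⟨hmem, hub⟩ := List.max?_eq_some_iff.1 hm
    apply List.max?_eq_some_iff.2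
    constructor
    · rcases le_total m e with h | h
      · simp [max_eq_right h]
      · simp [max_eq_left h, hmem]
    · intro b hb
      rcases List.mem_append.1 hb with hb | hb
      · exact le_trans (hub b hb) (le_max_left m e)
      · simp at hb; exact hb ▸ le_max_right m e

-- the loop invariant tying B's pointer state to the sorted list
def PtrInv (L : List (Int × Int × Int)) (t : Int) (p : Nat) (me : Option Int) : Prop :=
  p ≤ L.length ∧ (∀ i (h : i < L.length), i < p → (L[i]).1 < t) ∧
    me = ((L.take p).map (fun x => x.2.2)).max?

theorem advanceB_spec (L : List (Int × Int × Int)) :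
    ∀ (n : Nat) (t t' : Int) (p : Nat) (me : Option Int), L.length - p = n → t ≤ t' →
      PtrInv L t p me →
    PtrInv L t' (advanceB L t' p me).1 (advanceB L t' p me).2 ∧
      (∀ hh : (advanceB L t' p me).1 < L.length, t' ≤ (L[(advanceB L t' p me).1]).1) := by
  intro n
  induction n with
  | zero =>
    intro t t' p me hn ht h
    obtain ⟨hp, hlt, hme⟩ := h
    have hp' : ¬ p < L.length := by omega
    rw [advanceB, dif_neg hp']
    refine ⟨⟨hp, fun i hi hip => lt_of_lt_of_le (hlt i hi hip) ht, hme⟩, fun hh => absurd hh hp'⟩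
  | succ n ih =>
    intro t t' p me hn ht h
    obtain ⟨hp, hlt, hme⟩ := h
    have hp' : p < L.length := by omega
    subst hme
    rw [advanceB, dif_pos hp']
    by_cases hc : (L[p]).1 < t'
    · rw [if_pos hc]
      have htake : L.take (p+1) = L.take p ++ [L[p]] := by
        rw [List.take_add_one]
        simp [List.getElem?_eq_getElem hp']
      have hme' : (match ((L.take p).map (fun x => x.2.2)).max? with
          | none => some ((L[p]).2.2)
          | some m => if (L[p]).2.2 > m then some ((L[p]).2.2) else some m) =
          ((L.take (p+1)).map (fun x => x.2.2)).max? := by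
        rw [htake]
        simp only [List.map_append, List.map_cons, List.map_nil]
        rw [max?_concat]
        cases hl : ((L.take p).map (fun x => x.2.2)).max? with
        | none => simp
        | some m =>
          simp only [Option.elim]
          by_cases hgt : (L[p]).2.2 > m
          · rw [if_pos hgt, max_eq_right (le_of_lt hgt)]
          · rw [if_neg hgt, max_eq_left (by omega)]
      have hinv' : PtrInv L t' (p+1) (match ((L.take p).map (fun x => x.2.2)).max? with
          | none => some ((L[p]).2.2)
          | some m => if (L[p]).2.2 > m then some ((L[p]).2.2) else some m) := by
        refine ⟨by omega, ?_, hme'⟩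
        · intro i hi hip
          rcases Nat.lt_or_ge i p with h' | h'
          · exact lt_of_lt_of_le (hlt i hi h') ht
          · have : i = p := by omega
            subst this; exact hc
      exact ih t' t' (p+1) _ (by omega) le_rfl hinv'
    · rw [if_neg hc]
      exact ⟨⟨hp, fun i hi hip => lt_of_lt_of_le (hlt i hi hip) ht, rfl⟩,
        fun hh => le_of_not_gt hc⟩

theorem advanceB_post (L : List (Int × Int × Int)) (t t' : Int) (p : Nat) (me : Option Int)
    (ht : t ≤ t') (h : PtrInv L t p me) :
    PtrInv L t' (advanceB L t' p me).1 (advanceB L t' p me).2 ∧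
      (∀ hh : (advanceB L t' p me).1 < L.length, t' ≤ (L[(advanceB L t' p me).1]).1) :=
  advanceB_spec L (L.length - p) t t' p me rfl ht h

theorem take_eq_filter (L : List (Int × Int × Int))
    (hpw : L.Pairwise (fun a b => a.1 ≤ b.1)) (t : Int) (p : Nat) (hp : p ≤ L.length)
    (hlt : ∀ i (h : i < L.length), i < p → (L[i]).1 < t)
    (hge : ∀ hh : p < L.length, t ≤ (L[p]).1) :
    L.take p = L.filter (fun x => decide (x.1 < t)) ∧
      L.drop p = L.filter (fun x => decide (t ≤ x.1)) := by
  have hgeAll : ∀ i (h : i < L.length), p ≤ i → t ≤ (L[i]).1 := by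
    intro i hi hpi
    rcases Nat.eq_or_lt_of_le hpi with rfl | hlt'
    · exact hge hi
    · have hp' : p < L.length := lt_trans hlt' hi
      exact le_trans (hge hp') ((List.pairwise_iff_getElem.1 hpw) p i hp' hi hlt')
  have htake : L.take p = (L.take p).filter (fun x => decide (x.1 < t)) := by
    symm
    apply List.filter_eq_self.2
    intro x hx
    obtain ⟨i, hi, rfl⟩ := List.mem_iff_getElem.1 hx
    rw [List.getElem_take]
    have hilen : i < L.length := by
      have := List.length_take (i := p) (l := L); omega
    exact decide_eq_true (hlt i hilen (by have := hi; simp [List.length_take] at this; omega))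
  have hdrop : (L.drop p).filter (fun x => decide (x.1 < t)) = [] := by
    apply List.filter_eq_nil_iff.2
    intro x hx
    obtain ⟨i, hi, rfl⟩ := List.mem_iff_getElem.1 hx
    rw [List.getElem_drop]
    have h1 : p + i < L.length := by simp [List.length_drop] at hi; omega
    simp only [decide_eq_true_eq]
    have := hgeAll (p+i) h1 (by omega)
    simp only [not_lt]
    omega
  have htake2 : (L.take p).filter (fun x => decide (t ≤ x.1)) = [] := by
    apply List.filter_eq_nil_iff.2
    intro x hx
    obtain ⟨i, hi, rfl⟩ := List.mem_iff_getElem.1 hx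
    rw [List.getElem_take]
    have hilen : i < L.length := by
      have := List.length_take (i := p) (l := L); omega
    have := hlt i hilen (by simp [List.length_take] at hi; omega)
    simp only [decide_eq_true_eq, not_le]
    omega
  have hdrop2 : L.drop p = (L.drop p).filter (fun x => decide (t ≤ x.1)) := by
    symm
    apply List.filter_eq_self.2
    intro x hx
    obtain ⟨i, hi, rfl⟩ := List.mem_iff_getElem.1 hx
    rw [List.getElem_drop]
    have h1 : p + i < L.length := by simp [List.length_drop] at hi; omega
    exact decide_eq_true (hgeAll (p+i) h1 (by omega))
  constructor
  · conv_rhs => rw [← List.take_append_drop p L]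
    rw [List.filter_append, ← htake, hdrop, List.append_nil]
  · conv_rhs => rw [← List.take_append_drop p L]
    rw [List.filter_append, htake2, ← hdrop2, List.nil_append]

theorem min2?_char {α : Type} (lt : α → α → Bool) (step : Option α → α → Option α)
    (hstep : ∀ acc x, step acc x = match acc with
      | none => some x
      | some m => if lt x m then some x else some m)
    (m : α) : ∀ (xs : List α) (acc : Option α), m ∈ xs →
    (∀ y ∈ xs, lt y m = false) → (∀ y ∈ xs, y ≠ m → lt m y = true) →
    (acc = none ∨ ∃ a, acc = some a ∧ lt m a = true) →
    xs.foldl step acc = some m := by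
  intro xs
  induction xs with
  | nil => intro acc hm; exact absurd hm (List.not_mem_nil)
  | cons x rest ih =>
    intro acc hm hmin hstrict hacc
    have keep : ∀ (l : List α), (∀ y ∈ l, lt y m = false) → l.foldl step (some m) = some m := by
      intro l
      induction l with
      | nil => intro _; rfl
      | cons z zs ihz =>
        intro hz
        have : step (some m) z = some m := by
          rw [hstep]; simp [hz z (List.mem_cons_self)]
        rw [List.foldl_cons, this]
        exact ihz (fun y hy => hz y (List.mem_cons_of_mem _ hy))
    rw [List.foldl_cons]
    by_cases hxm : x = m
    · subst hxm
      have hab : step acc x = some x := by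
        rcases hacc with rfl | ⟨a, rfl, ha⟩
        · rw [hstep]
        · rw [hstep]; simp only [ha, if_true]
      rw [hab]
      exact keep rest (fun y hy => hmin y (List.mem_cons_of_mem _ hy))
    · have hmrest : m ∈ rest := by
        rcases List.mem_cons.1 hm with h | h
        · exact absurd h.symm hxm
        · exact h
      apply ih _ hmrest (fun y hy => hmin y (List.mem_cons_of_mem _ hy))
        (fun y hy hne => hstrict y (List.mem_cons_of_mem _ hy) hne)
      right
      rcases hacc with rfl | ⟨a, rfl, ha⟩
      · rw [hstep]
        exact ⟨x, rfl, hstrict x (List.mem_cons_self) hxm⟩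
      · rw [hstep]
        simp only
        by_cases hc : lt x a = true
        · rw [if_pos hc]
          exact ⟨x, rfl, hstrict x (List.mem_cons_self) hxm⟩
        · rw [if_neg hc]
          exact ⟨a, rfl, ha⟩

theorem step_equal (T : List (Int × Int)) (seg : Int)
    (p : Nat) (me : Option Int) (accI accY : List (List Int))
    (hinv : PtrInv (bOrderOf T) (5 * seg) p me) :
    (stepB (bOrderOf T) (p, me, accI, accY) seg).2.2 = stepA T (accI, accY) seg ∧
      PtrInv (bOrderOf T) (5 * seg + 5) (stepB (bOrderOf T) (p, me, accI, accY) seg).1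
        (stepB (bOrderOf T) (p, me, accI, accY) seg).2.1 := by
  have hpw := bOrderOf_pairwise_le T
  have hSlt := bOrderOf_pairwise_lt T
  have hperm := bOrderOf_perm T
  simp only [stepA, stepB, SECONDS_PER_SEGMENT]
  have e1 : (5:Int) * (seg + 0) = 5 * seg := by ring
  have e2 : (5:Int) * (seg + 1) = 5 * seg + 5 := by ring
  simp only [e1, e2]
  obtain ⟨⟨hplen, hltAll, hmeEq⟩, hstop⟩ :=
    advanceB_post (bOrderOf T) (5*seg) (5*seg+5) p me (by omega) hinv
  obtain ⟨hTake, hDrop⟩ := take_eq_filter (bOrderOf T) hpw (5*seg+5)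
    (advanceB (bOrderOf T) (5*seg+5) p me).1 hplen hltAll hstop
  have hov : any_overlapA (5*seg) (5*seg+5) T =
      (match (advanceB (bOrderOf T) (5*seg+5) p me).2 with
        | none => false
        | some m => decide (5*seg < m)) := by
    have h1 : any_overlapA (5*seg) (5*seg+5) T
        = (triplesOf T).any (fun x => decide (5*seg < x.2.2) && decide (x.1 < 5*seg+5)) := by
      unfold any_overlapA
      rw [Bool.eq_iff_iff, List.any_eq_true, List.any_eq_true]
      constructor
      · rintro ⟨y, hy, hq⟩
        obtain ⟨k, hk, rfl⟩ := List.mem_iff_getElem.1 hy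
        refine ⟨(T[k].1, (k : Int), T[k].2), ?_, ?_⟩
        · exact List.mem_map_of_mem ((PySem.List.mem_enumerate_iff T 0 (((k:Nat):Int), T[k])).2 ⟨k, hk, by simp⟩)
        · simp only [overlapsA, Bool.or_eq_true, Bool.and_eq_true,
            decide_eq_true_iff] at hq ⊢
          constructor <;> omega
      · rintro ⟨x, hx, hq⟩
        obtain ⟨e, he, rfl⟩ := List.mem_map.1 hx
        obtain ⟨k, hk, rfl⟩ := (PySem.List.mem_enumerate_iff T 0 e).1 he
        refine ⟨T[k], List.getElem_mem hk, ?_⟩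
        simp only [overlapsA, Bool.or_eq_true, Bool.and_eq_true, decide_eq_true_iff] at hq ⊢
        omega
    have h2 : (triplesOf T).any (fun x => decide (5*seg < x.2.2) && decide (x.1 < 5*seg+5))
        = (bOrderOf T).any (fun x => decide (5*seg < x.2.2) && decide (x.1 < 5*seg+5)) := by
      rw [Bool.eq_iff_iff, List.any_eq_true, List.any_eq_true]
      exact ⟨fun ⟨x, hx, hq⟩ => ⟨x, hperm.mem_iff.2 hx, hq⟩,
             fun ⟨x, hx, hq⟩ => ⟨x, hperm.mem_iff.1 hx, hq⟩⟩
    have h3 : (bOrderOf T).any (fun x => decide (5*seg < x.2.2) && decide (x.1 < 5*seg+5))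
        = ((bOrderOf T).filter (fun x => decide (x.1 < 5*seg+5))).any
            (fun x => decide (5*seg < x.2.2)) := by
      rw [List.any_filter]
      exact PySem.List.any_congr_mem (fun x _ => Bool.and_comm _ _)
    rw [h1, h2, h3, ← hTake]
    cases hme2 : (advanceB (bOrderOf T) (5*seg+5) p me).2 with
    | none =>
      rw [hme2] at hmeEq
      have : ((bOrderOf T).take (advanceB (bOrderOf T) (5*seg+5) p me).1).map
          (fun x => x.2.2) = [] := List.max?_eq_none_iff.1 hmeEq.symm
      rw [List.map_eq_nil_iff.1 this]
      rfl
    | some m =>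
      rw [hme2] at hmeEq
      obtain ⟨hmem, hub⟩ := List.max?_eq_some_iff.1 hmeEq.symm
      rw [Bool.eq_iff_iff, List.any_eq_true]
      simp only [decide_eq_true_iff]
      constructor
      · rintro ⟨x, hx, hq⟩
        exact lt_of_lt_of_le hq (hub _ (List.mem_map_of_mem hx))
      · intro hlt'
        obtain ⟨x, hx, rfl⟩ := List.mem_map.1 hmem
        exact ⟨x, hx, hlt'⟩
  have htbes : (((PySem.List.enumerate T 0).filter
        (fun q => decide (5*seg+5 ≤ q.2.1))).map (fun q => (q.2.1 - (5*seg+5), q.1))).Perm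
      (((bOrderOf T).drop (advanceB (bOrderOf T) (5*seg+5) p me).1).map
        (fun x => (x.1 - (5*seg+5), x.2.1))) := by
    rw [hDrop]
    have heq : ((PySem.List.enumerate T 0).filter
          (fun q => decide (5*seg+5 ≤ q.2.1))).map (fun q => (q.2.1 - (5*seg+5), q.1))
        = ((triplesOf T).filter (fun x => decide (5*seg+5 ≤ x.1))).map
            (fun x => (x.1 - (5*seg+5), x.2.1)) := by
      unfold triplesOf
      rw [List.filter_map, List.map_map]
      rfl
    rw [heq]
    exact ((hperm.filter _).map _).symm
  rcases hdc : (bOrderOf T).drop (advanceB (bOrderOf T) (5*seg+5) p me).1 with _ | ⟨h0, restL⟩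
  · -- no seizure starts at or after the segment end: both sides leave the state unchanged
    have hlen : (bOrderOf T).length ≤ (advanceB (bOrderOf T) (5*seg+5) p me).1 :=
      List.drop_eq_nil_iff.1 hdc
    rw [hdc] at htbes
    simp only [List.map_nil] at htbes
    have htn := htbes.eq_nil
    rw [dif_neg (by omega), htn]
    exact ⟨rfl, hplen, hltAll, hmeEq⟩
  · -- the next seizure is at the pointer
    have hlen : (advanceB (bOrderOf T) (5*seg+5) p me).1 < (bOrderOf T).length := by
      by_contra hcon
      rw [List.drop_eq_nil_iff.2 (by omega)] at hdc
      exact List.cons_ne_nil _ _ hdc.symm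
    have hL0 : (bOrderOf T)[(advanceB (bOrderOf T) (5*seg+5) p me).1]'hlen = h0 := by
      have h00 : ((bOrderOf T).drop (advanceB (bOrderOf T) (5*seg+5) p me).1)[0]'(by
          rw [hdc]; simp) = h0 := by
        simp [hdc]
      rw [List.getElem_drop] at h00
      simpa using h00
    rw [hdc] at htbes
    have hdropPW : (h0 :: restL).Pairwise
        (fun a b => a.1 < b.1 ∨ (a.1 = b.1 ∧ a.2.1 < b.2.1)) := hdc ▸ hSlt.drop
    have hmem : ((h0.1 - (5*seg+5), h0.2.1) : Int × Int) ∈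
        ((PySem.List.enumerate T 0).filter
          (fun q => decide (5*seg+5 ≤ q.2.1))).map (fun q => (q.2.1 - (5*seg+5), q.1)) :=
      htbes.mem_iff.2 (List.mem_map_of_mem List.mem_cons_self)
    have hmin2 : PySem.List.min2?
        (((PySem.List.enumerate T 0).filter
          (fun q => decide (5*seg+5 ≤ q.2.1))).map (fun q => (q.2.1 - (5*seg+5), q.1)))
        (fun q => q.1) (fun q => q.2) = some ((h0.1 - (5*seg+5), h0.2.1) : Int × Int) := by
      apply min2?_char
        (fun (a b : Int × Int) => decide (a.1 < b.1) || (!decide (b.1 < a.1) && decide (a.2 < b.2)))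
        _ (fun acc x => rfl) _ _ none hmem ?_ ?_ (Or.inl rfl)
      · intro y hy
        obtain ⟨x, hx, rfl⟩ := List.mem_map.1 (htbes.mem_iff.1 hy)
        rcases List.mem_cons.1 hx with rfl | hx
        · simp
        · have hrel := (List.pairwise_cons.1 hdropPW).1 x hx
          simp only [Bool.or_eq_false_iff, Bool.and_eq_false_iff, decide_eq_false_iff_not,
            Bool.not_eq_false', decide_eq_true_iff]
          omega
      · intro y hy hne
        obtain ⟨x, hx, rfl⟩ := List.mem_map.1 (htbes.mem_iff.1 hy)
        rcases List.mem_cons.1 hx with rfl | hx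
        · exact absurd rfl hne
        · have hrel := (List.pairwise_cons.1 hdropPW).1 x hx
          simp only [Bool.or_eq_true, Bool.and_eq_true, decide_eq_true_iff,
            Bool.not_eq_true', decide_eq_false_iff_not]
          omega
    rw [dif_pos hlen, hmin2, hov, hL0]
    cases hme2 : (advanceB (bOrderOf T) (5*seg+5) p me).2 with
    | none =>
      rw [hme2] at hmeEq
      exact ⟨rfl, hplen, hltAll, hmeEq⟩
    | some mx =>
      rw [hme2] at hmeEq
      by_cases hcond : mx ≤ 5*seg
      · rw [if_pos (by simpa using hcond)]
        constructor
        · have : (5*seg < mx) = False := by simp; omega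
          simp [this]
        · exact ⟨hplen, hltAll, hmeEq⟩
      · rw [if_neg (by simpa using hcond)]
        constructor
        · have : (5*seg < mx) = True := by simp; omega
          simp only [this, decide_true, Bool.not_true]
          rfl
        · exact ⟨hplen, hltAll, hmeEq⟩

theorem loop_equal (T : List (Int × Int)) (k : Nat) :
    ((PySem.List.pyRange 0 (k : Int) 1).foldl (stepB (bOrderOf T))
        (0, none, List.replicate T.length [], List.replicate T.length [])).2.2 =
      (PySem.List.pyRange 0 (k : Int) 1).foldl (stepA T)
        (List.replicate T.length [], List.replicate T.length []) ∧
      PtrInv (bOrderOf T) (5 * (k : Int))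
        ((PySem.List.pyRange 0 (k : Int) 1).foldl (stepB (bOrderOf T))
          (0, none, List.replicate T.length [], List.replicate T.length [])).1
        ((PySem.List.pyRange 0 (k : Int) 1).foldl (stepB (bOrderOf T))
          (0, none, List.replicate T.length [], List.replicate T.length [])).2.1 := by
  induction k with
  | zero =>
    rw [Nat.cast_zero, PySem.List.pyRange_one_eq_nil le_rfl]
    refine ⟨rfl, Nat.zero_le _, fun i hi hip => absurd hip (Nat.not_lt_zero i), by simp⟩
  | succ k ih =>
    obtain ⟨ihEq, ihInv⟩ := ih
    have hcast : ((k+1 : Nat) : Int) = (k : Int) + 1 := by push_cast; ring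
    rw [hcast, PySem.List.pyRange_one_succ_right (Int.natCast_nonneg k)]
    rw [List.foldl_append, List.foldl_append]
    simp only [List.foldl_cons, List.foldl_nil]
    have h5 : (5 : Int) * ((k : Int) + 1) = 5 * (k : Int) + 5 := by ring
    rw [h5]
    obtain ⟨hstep1, hstep2⟩ := step_equal T (k : Int)
      ((PySem.List.pyRange 0 (k : Int) 1).foldl (stepB (bOrderOf T))
        (0, none, List.replicate T.length [], List.replicate T.length [])).1
      ((PySem.List.pyRange 0 (k : Int) 1).foldl (stepB (bOrderOf T))
        (0, none, List.replicate T.length [], List.replicate T.length [])).2.1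
      ((PySem.List.pyRange 0 (k : Int) 1).foldl (stepB (bOrderOf T))
        (0, none, List.replicate T.length [], List.replicate T.length [])).2.2.1
      ((PySem.List.pyRange 0 (k : Int) 1).foldl (stepB (bOrderOf T))
        (0, none, List.replicate T.length [], List.replicate T.length [])).2.2.2
      ihInv
    refine ⟨?_, hstep2⟩
    exact hstep1.trans (congrArg (fun z => stepA T z (k : Int)) ihEq)

theorem select_segments_eq (num_segments : Int) (seizure_times : List (Int × Int)) :
    select_segments num_segments seizure_times =
      select_segments_alt num_segments seizure_times := by
  simp only [select_segments, select_segments_alt]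
  have horder : PySem.List.sorted2
      ((PySem.List.enumerate seizure_times 0).map (fun q => (q.2.1, q.1, q.2.2)))
      (fun t => t.1) (fun t => t.2.1) = bOrderOf seizure_times := rfl
  rw [horder]
  by_cases hn : 0 ≤ num_segments
  · obtain ⟨hEq, -⟩ := loop_equal seizure_times num_segments.toNat
    rw [Int.toNat_of_nonneg hn] at hEq
    rw [← hEq]
  · rw [PySem.List.pyRange_one_eq_nil (by omega)]
    rfl

-- ===== VERDICT (by name: the statement is the Claim_ definition above) =====
theorem select_segments_spec : Claim_equal_select_segments := by
  intro n T _
  exact select_segments_eq n T
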